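-- pv_equiv track=rewrite | github.com/ThaiJamesLee/IR_Complex_Question_Retrieval | metrics_calculate.py | filter_predict_by_top_k
-- ===== SOURCE A (Python) =====
-- def filter_predict_by_top_k(scores, top_k =10):
--     """
--     :param scores: predicted docs, dict of key, value{docid:socre, ..} pairs
--     :param top_k: top_k has default value of 10
--     :return: filtered dict of top_k best scores
--     """
--     filtered_pred = {}
--     for k, v in scores.items():
--         filtered = {}
--         index = 0
--         for w in sorted(v, key=v.get, reverse=True):
--             if index < top_k:
--                 filtered.update({w: v[w]})
--                 index += 1
--             else:
--                 break
--         filtered_pred.update({k: filtered})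
--     return filtered_pred
-- ===== SOURCE B (Python) =====
-- def filter_predict_by_top_k(scores, top_k=10):
--     """Top_k best-scored docs per query by repeated first-max selection scans."""
--     filtered_pred = {}
--     for k, v in scores.items():
--         candidates = list(v)
--         filtered = {}
--         for _ in range(top_k):
--             if not candidates:
--                 break
--             best = candidates[0]
--             for w in candidates[1:]:
--                 if v[w] > v[best]:
--                     best = w
--             filtered[best] = v[best]
--             candidates.remove(best)
--         filtered_pred[k] = filtered
--     return filtered_pred
-- ===== Notes on version B (the rewrite author's own statement) =====
-- stated objective: alternative
-- what changed: Replaces A's per-query stable descending sort plus counter/break loop by top_k repeated linear scans that each select the first remaining docid with maximal score and remove it from the candidate list.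
import Mathlib
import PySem

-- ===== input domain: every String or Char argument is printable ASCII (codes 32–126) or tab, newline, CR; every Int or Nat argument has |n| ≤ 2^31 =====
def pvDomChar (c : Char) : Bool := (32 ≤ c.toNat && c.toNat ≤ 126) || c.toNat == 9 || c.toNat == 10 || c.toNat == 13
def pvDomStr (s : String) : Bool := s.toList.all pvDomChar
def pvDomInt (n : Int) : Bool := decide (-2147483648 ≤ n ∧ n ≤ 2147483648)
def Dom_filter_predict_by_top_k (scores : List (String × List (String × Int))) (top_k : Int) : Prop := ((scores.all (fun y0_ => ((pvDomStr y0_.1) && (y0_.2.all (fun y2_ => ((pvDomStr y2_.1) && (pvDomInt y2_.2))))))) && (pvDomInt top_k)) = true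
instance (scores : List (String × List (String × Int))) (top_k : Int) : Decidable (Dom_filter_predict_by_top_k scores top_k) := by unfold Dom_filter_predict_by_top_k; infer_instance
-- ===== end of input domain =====

-- B replaces A's per-query stable descending sort + counter loop by repeated first-max
-- selection scans (alternative algorithm, not claimed faster).

-- ===== PORT A =====
-- v[w] / v.get(w): first-match lookup; only ever applied to keys of v, where it is exact
def pvGet (v : List (String × Int)) (w : String) : Int := (PySem.Dict.get? ⟨v⟩ w).getD 0

-- the inner 'for w in sorted(...): if index < top_k: filtered.update({w: v[w]}); index += 1 else: break'
def pvTakeTopK (v : List (String × Int)) (top_k : Int) :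
    List String → List (String × Int) → Int → List (String × Int)
  | [], filtered, _ => filtered
  | w :: ws, filtered, index =>
      if index < top_k then
        pvTakeTopK v top_k ws (PySem.Dict.insert ⟨filtered⟩ w (pvGet v w)).items (index + 1)
      else filtered

def filter_predict_by_top_k (scores : List (String × List (String × Int))) (top_k : Int) :
    List (String × List (String × Int)) :=
  scores.foldl (fun filtered_pred kv =>
    let filtered := pvTakeTopK kv.2 top_k
      (PySem.List.sorted (kv.2.map Prod.fst) (fun w => pvGet kv.2 w) true) [] 0
    (PySem.Dict.insert ⟨filtered_pred⟩ kv.1 filtered).items) []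

-- ===== PORT B =====
-- 'for _ in range(top_k): if not candidates: break; scan for first max; append; remove'
def pvSelLoop (v : List (String × Int)) :
    Nat → List String → List (String × Int) → List (String × Int)
  | 0, _, filtered => filtered
  | _ + 1, [], filtered => filtered
  | n + 1, c :: cs, filtered =>
      let best := cs.foldl (fun b w => if pvGet v w > pvGet v b then w else b) c
      -- candidates.remove(best): best is always a member, so remove? is some
      pvSelLoop v n ((PySem.List.remove? (c :: cs) best).getD [])
        (PySem.Dict.insert ⟨filtered⟩ best (pvGet v best)).items

def filter_predict_by_top_k_alt (scores : List (String × List (String × Int))) (top_k : Int) :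
    List (String × List (String × Int)) :=
  scores.foldl (fun filtered_pred kv =>
    let filtered := pvSelLoop kv.2 top_k.toNat (kv.2.map Prod.fst) []
    (PySem.Dict.insert ⟨filtered_pred⟩ kv.1 filtered).items) []

-- ===== PRECONDITION & SPEC =====
-- Pre_ excludes score lists in which some inner association list repeats a docid: such a
-- list does not encode a Python dict argument (Python collapses the duplicates before the
-- function even runs), so no list-level behaviour of A is specified there.
def Pre_filter_predict_by_top_k (scores : List (String × List (String × Int))) (top_k : Int) : Prop :=
  ∀ kv ∈ scores, (kv.2.map Prod.fst).Nodup
instance (scores : List (String × List (String × Int))) (top_k : Int) : Decidable (Pre_filter_predict_by_top_k scores top_k) := by unfold Pre_filter_predict_by_top_k; infer_instance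

def pvWitness_filter_predict_by_top_k : (List (String × List (String × Int))) × Int :=
  ([("q1", [("a", 1), ("b", 2), ("c", 2)]), ("q2", [])], 2)

def Spec_filter_predict_by_top_k (scores : List (String × List (String × Int))) (top_k : Int) (out : List (String × List (String × Int))) : Prop := out = filter_predict_by_top_k_alt scores top_k
instance (scores : List (String × List (String × Int))) (top_k : Int) (out : List (String × List (String × Int))) : Decidable (Spec_filter_predict_by_top_k scores top_k out) := by unfold Spec_filter_predict_by_top_k; infer_instance

-- ===== CLAIM (what is proved, stated in full; the proofs are below) =====
def Claim_equal_filter_predict_by_top_k : Prop := ∀ (scores : List (String × List (String × Int))) (top_k : Int), Dom_filter_predict_by_top_k scores top_k → Pre_filter_predict_by_top_k scores top_k → Spec_filter_predict_by_top_k scores top_k (filter_predict_by_top_k scores top_k)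

-- ===== LEMMAS AND PROOFS =====

-- Dict.insert on a key not yet present appends
theorem pv_insert_fresh (l : List (String × Int)) (k : String) (x : Int)
    (h : k ∉ l.map Prod.fst) :
    (PySem.Dict.insert ⟨l⟩ k x).items = l ++ [(k, x)] := by
  have hc : (PySem.Dict.contains (⟨l⟩ : PySem.Dict String Int) k) = false := by
    rw [PySem.Dict.contains]
    simp only [List.any_eq_false]
    intro p hp e
    exact h (eq_of_beq e ▸ List.mem_map_of_mem hp)
  simp [PySem.Dict.insert, hc]

-- the first-max scan returns a member of the candidate list
theorem pv_fm_mem (g : String → Int) :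
    ∀ (cs : List String) (c : String),
      cs.foldl (fun b w => if g w > g b then w else b) c ∈ c :: cs := by
  intro cs
  induction cs with
  | nil => intro c; simp
  | cons d ds ih =>
      intro c
      have h := ih (if g d > g c then d else c)
      rw [List.foldl_cons]
      rcases List.mem_cons.1 h with h' | h'
      · rw [h']
        split <;> simp
      · exact List.mem_cons_of_mem _ (List.mem_cons_of_mem _ h')

-- stable descending sort of xs ++ [x] inserts x into the sorted xs
theorem pv_sorted_snoc (g : String → Int) (xs : List String) (x : String) :
    PySem.List.sorted (xs ++ [x]) g true =
      PySem.List.insertBy (fun a b => decide (g b < g a)) x (PySem.List.sorted xs g true) := by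
  rw [PySem.List.sorted_rev_eq_foldl_insertBy, PySem.List.sorted_rev_eq_foldl_insertBy,
    List.foldl_append]
  rfl

-- head extraction: on a duplicate-free list the stable descending sort is the first
-- key-maximal element followed by the stable descending sort of the remaining list
theorem pv_sorted_head (g : String → Int) :
    ∀ (cs : List String) (c : String), (c :: cs).Nodup →
      PySem.List.sorted (c :: cs) g true =
        (cs.foldl (fun b w => if g w > g b then w else b) c) ::
          PySem.List.sorted ((c :: cs).erase
            (cs.foldl (fun b w => if g w > g b then w else b) c)) g true := by
  intro cs
  induction cs using List.reverseRecOn with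
  | nil =>
      intro c _
      have h1 : PySem.List.sorted [c] g true = [c] := rfl
      simp [h1]
      rfl
  | append_singleton ds x ih =>
      intro c hnd
      have h1 : ((c :: ds) ++ [x]).Nodup := by simpa using hnd
      have h2 := List.nodup_append.1 h1
      have hnd' : (c :: ds).Nodup := h2.1
      have hx : x ∉ c :: ds := fun hmem => h2.2.2 x hmem x (List.mem_singleton_self x) rfl
      have hmmem : ds.foldl (fun b w => if g w > g b then w else b) c ∈ c :: ds :=
        pv_fm_mem g ds c
      have hfold : (ds ++ [x]).foldl (fun b w => if g w > g b then w else b) c =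
          if g x > g (ds.foldl (fun b w => if g w > g b then w else b) c) then x
          else ds.foldl (fun b w => if g w > g b then w else b) c := by
        rw [List.foldl_append]; rfl
      have hcons : c :: (ds ++ [x]) = (c :: ds) ++ [x] := rfl
      set m := ds.foldl (fun b w => if g w > g b then w else b) c with hm
      set T := PySem.List.sorted ((c :: ds).erase m) g true with hT
      have hstep : PySem.List.insertBy (fun a b => decide (g b < g a)) x (m :: T) =
          if decide (g m < g x) then x :: m :: T
          else m :: PySem.List.insertBy (fun a b => decide (g b < g a)) x T := rfl
      rw [hcons, hfold, pv_sorted_snoc g (c :: ds) x, ih c hnd', hstep]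
      by_cases hgt : g x > g m
      · rw [if_pos hgt, if_pos (by simpa using hgt)]
        have herase : ((c :: ds) ++ [x]).erase x = c :: ds := by
          rw [List.erase_append_right _ hx]; simp
        rw [herase, ih c hnd']
      · rw [if_neg hgt, if_neg (by simpa using hgt)]
        have herase : ((c :: ds) ++ [x]).erase m = (c :: ds).erase m ++ [x] :=
          List.erase_append_left _ hmmem
        rw [herase, pv_sorted_snoc g ((c :: ds).erase m) x]

-- A's inner loop writes the first (top_k - index) sorted keys, paired with their scores
theorem pv_takeTopK_eq (v : List (String × Int)) (top_k : Int) :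
    ∀ (ws : List String) (filtered : List (String × Int)) (index : Int),
      ws.Nodup → (∀ w ∈ ws, w ∉ filtered.map Prod.fst) →
      pvTakeTopK v top_k ws filtered index =
        filtered ++ ((ws.take (top_k - index).toNat).map (fun w => (w, pvGet v w))) := by
  intro ws
  induction ws with
  | nil => intro filtered index _ _; simp [pvTakeTopK]
  | cons w ws' ih =>
      intro filtered index hnd hdisj
      rw [pvTakeTopK]
      by_cases hlt : index < top_k
      · rw [if_pos hlt]
        rw [pv_insert_fresh _ _ _ (hdisj w (by simp))]
        rw [ih _ (index + 1) hnd.of_cons]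
        · have hn : (top_k - index).toNat = (top_k - (index + 1)).toNat + 1 := by omega
          simp [hn]
        · intro w' hw'
          simp only [List.map_append, List.mem_append]
          push Not
          refine ⟨hdisj w' (by simp [hw']), ?_⟩
          simp only [List.map_cons, List.map_nil, List.mem_singleton]
          exact fun e => (List.nodup_cons.1 hnd).1 (e ▸ hw')
      · rw [if_neg hlt]
        have hz : (top_k - index).toNat = 0 := by omega
        simp [hz]

-- B's selection loop writes the first n keys of the stable descending sort
theorem pv_selLoop_eq (v : List (String × Int)) :
    ∀ (n : Nat) (cand : List String) (filtered : List (String × Int)),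
      cand.Nodup → (∀ w ∈ cand, w ∉ filtered.map Prod.fst) →
      pvSelLoop v n cand filtered =
        filtered ++ (((PySem.List.sorted cand (fun w => pvGet v w) true).take n).map
          (fun w => (w, pvGet v w))) := by
  intro n
  induction n with
  | zero => intro cand filtered _ _; simp [pvSelLoop]
  | succ n ih =>
      intro cand filtered hnd hdisj
      match cand with
      | [] =>
          have h0 : PySem.List.sorted ([] : List String) (fun w => pvGet v w) true = [] := rfl
          simp [pvSelLoop, h0]
      | c :: cs =>
          rw [pvSelLoop]
          set best := cs.foldl (fun b w => if pvGet v w > pvGet v b then w else b) c with hb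
          have hmem : best ∈ c :: cs := pv_fm_mem (fun w => pvGet v w) cs c
          have hrem : (PySem.List.remove? (c :: cs) best).getD [] = (c :: cs).erase best := by
            rw [PySem.List.remove?_eq_some_erase _ _ hmem]; rfl
          rw [hrem, pv_insert_fresh _ _ _ (hdisj best hmem)]
          rw [ih ((c :: cs).erase best) _ (hnd.erase best)]
          · rw [pv_sorted_head (fun w => pvGet v w) cs c hnd, List.take_succ_cons]
            rw [← hb]
            simp
          · intro w hw
            have hwmem : w ∈ c :: cs := List.mem_of_mem_erase hw
            have hne : w ≠ best := ((List.Nodup.mem_erase_iff hnd).1 hw).1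
            simp only [List.map_append, List.mem_append]
            push Not
            exact ⟨hdisj w hwmem, by simp [hne]⟩

-- per-query equality of the two inner computations
theorem pv_inner_eq (v : List (String × Int)) (top_k : Int)
    (h : (v.map Prod.fst).Nodup) :
    pvTakeTopK v top_k
        (PySem.List.sorted (v.map Prod.fst) (fun w => pvGet v w) true) [] 0 =
      pvSelLoop v top_k.toNat (v.map Prod.fst) [] := by
  have hsnd : (PySem.List.sorted (v.map Prod.fst) (fun w => pvGet v w) true).Nodup :=
    ((PySem.List.sorted_perm (v.map Prod.fst) (fun w => pvGet v w) true).nodup_iff).mpr h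
  rw [pv_takeTopK_eq v top_k _ [] 0 hsnd (by simp)]
  rw [pv_selLoop_eq v top_k.toNat (v.map Prod.fst) [] h (by simp)]
  simp

-- ===== VERDICT (by name: the statement is the Claim_ definition above) =====
theorem filter_predict_by_top_k_spec : Claim_equal_filter_predict_by_top_k := by
  intro scores top_k _ hpre
  unfold Spec_filter_predict_by_top_k
  unfold filter_predict_by_top_k filter_predict_by_top_k_alt
  apply PySem.List.foldl_congr_mem
  intro acc kv hkv
  simp only
  rw [pv_inner_eq kv.2 top_k (hpre kv hkv)]
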